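-- pv_equiv track=rewrite | github.com/Sassi1000/Solutions_to_problems_at_the_LeetCode_level | A_changing_number/A_changing_number/A_changing_number.py | A_changing_number
-- ===== SOURCE A (Python) =====
-- def A_changing_number(f):
--     if(f<10):
--         return True
--     while(f>9):
--         if(f%2==(f//10)%2):
--             return False
--         f=f//10
--     return True
-- ===== SOURCE B (Python) =====
-- def A_changing_number(f):
--     if f < 10:
--         return True
--     s = str(f)
--     return all(int(a) % 2 != int(b) % 2 for a, b in zip(s, s[1:]))
-- ===== Notes on version B (the rewrite author's own statement) =====
-- stated objective: simpler
-- what changed: B keeps A's early-return guard for small inputs but replaces the arithmetic digit-peeling while-loop (least-significant-first floor division with early return) by a one-liner over the decimal string: all adjacent character pairs of str(f) must differ in digit parity.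
import Mathlib
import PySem

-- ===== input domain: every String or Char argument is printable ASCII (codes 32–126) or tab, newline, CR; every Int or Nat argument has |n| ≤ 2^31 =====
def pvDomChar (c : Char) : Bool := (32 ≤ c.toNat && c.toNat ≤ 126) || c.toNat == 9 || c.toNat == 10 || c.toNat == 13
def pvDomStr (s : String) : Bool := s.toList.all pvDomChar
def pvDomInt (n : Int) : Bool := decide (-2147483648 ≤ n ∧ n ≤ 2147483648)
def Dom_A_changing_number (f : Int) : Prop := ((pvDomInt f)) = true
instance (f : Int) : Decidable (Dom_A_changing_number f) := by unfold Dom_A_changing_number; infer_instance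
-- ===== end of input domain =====

-- B replaces A's arithmetic digit-peeling loop by a pairwise parity check over str(f); same values.


-- ===== PORT A =====
lemma pvFdiv10 (a : Int) : a.fdiv 10 = a / 10 := by rw [Int.fdiv_eq_ediv]; simp

-- while(f>9): if(f%2==(f//10)%2): return False; f=f//10 … return True
def pvLoopA (f : Int) : Bool :=
  if f > 9 then
    if PySem.Int.mod f 2 == PySem.Int.mod (PySem.Int.floordiv f 10) 2 then false
    else pvLoopA (PySem.Int.floordiv f 10)
  else true
termination_by f.toNat
decreasing_by
  simp only [PySem.Int.floordiv, pvFdiv10]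
  omega

def A_changing_number (f : Int) : Bool :=
  if f < 10 then true
  else pvLoopA f

-- ===== PORT B =====
-- int(a) for a single decimal-digit character a (exact on digit chars, the only ones str(f) yields here)
def pvDigitInt (c : Char) : Int := (c.toNat : Int) - 48

-- all(int(a) % 2 != int(b) % 2 for a, b in zip(s, s[1:]))
def pvAltPairs : List Char → Bool
  | a :: b :: t =>
      (PySem.Int.mod (pvDigitInt a) 2 != PySem.Int.mod (pvDigitInt b) 2) && pvAltPairs (b :: t)
  | _ => true

def A_changing_number_alt (f : Int) : Bool :=
  if f < 10 then true
  else pvAltPairs (PySem.Int.toStr f).toList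

-- ===== PRECONDITION & SPEC =====
def Spec_A_changing_number (f : Int) (out : Bool) : Prop := out = A_changing_number_alt f
instance (f : Int) (out : Bool) : Decidable (Spec_A_changing_number f out) := by unfold Spec_A_changing_number; infer_instance

-- ===== CLAIM (what is proved, stated in full; the proofs are below) =====
def Claim_equal_A_changing_number : Prop := ∀ (f : Int), Dom_A_changing_number f → Spec_A_changing_number f (A_changing_number f)

-- ===== LEMMAS AND PROOFS =====

-- parity chain over the least-significant-first digit list
def pvAltNat : List Nat → Bool
  | a :: b :: t => (a % 2 != b % 2) && pvAltNat (b :: t)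
  | _ => true

lemma pvAltNat_iff : ∀ l : List Nat,
    pvAltNat l = true ↔ List.IsChain (fun a b : Nat => a % 2 ≠ b % 2) l
  | [] => by simp [pvAltNat]
  | [a] => by simp [pvAltNat]
  | a :: b :: t => by
      simp [pvAltNat, List.isChain_cons_cons, pvAltNat_iff (b :: t), bne_iff_ne]

lemma pvAltPairs_iff : ∀ cs : List Char,
    pvAltPairs cs = true ↔
      List.IsChain (fun a b : Char =>
        PySem.Int.mod (pvDigitInt a) 2 ≠ PySem.Int.mod (pvDigitInt b) 2) cs
  | [] => by simp [pvAltPairs]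
  | [a] => by simp [pvAltPairs]
  | a :: b :: t => by
      simp [pvAltPairs, List.isChain_cons_cons, pvAltPairs_iff (b :: t), bne_iff_ne]

lemma isChain_congr_mem {α : Type} {R S : α → α → Prop} :
    ∀ l : List α, (∀ a ∈ l, ∀ b ∈ l, (R a b ↔ S a b)) →
      (List.IsChain R l ↔ List.IsChain S l)
  | [] => by simp
  | [a] => by simp
  | a :: b :: t => fun h => by
      rw [List.isChain_cons_cons, List.isChain_cons_cons,
        isChain_congr_mem (b :: t) (fun x hx y hy => h x (by simp_all) y (by simp_all)),
        h a (by simp) b (by simp)]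

lemma pvDigitInt_digitChar {d : Nat} (hd : d < 10) :
    pvDigitInt (Nat.digitChar d) = (d : Int) := by
  interval_cases d <;> rfl

lemma mod_cast_two (d : Nat) : PySem.Int.mod (d : Int) 2 = ((d % 2 : Nat) : Int) := by
  simp only [PySem.Int.mod, Int.fmod_eq_emod]
  simp

-- the character pairs of the reversed digit list alternate iff the digit list does
lemma pvAltPairs_rev (l : List Nat) (hl : ∀ d ∈ l, d < 10) :
    pvAltPairs ((l.map Nat.digitChar).reverse) = pvAltNat l := by
  rw [Bool.eq_iff_iff, pvAltPairs_iff, pvAltNat_iff, List.isChain_reverse, List.isChain_map]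
  apply isChain_congr_mem
  intro a ha b hb
  rw [pvDigitInt_digitChar (hl a ha), pvDigitInt_digitChar (hl b hb),
    mod_cast_two, mod_cast_two]
  constructor
  · intro h heq; exact h (by omega)
  · intro h heq; exact h (by omega)

-- Nat.toDigits is the reversed digit-character list
lemma toDigitsCore_eq : ∀ (fuel n : Nat) (ds : List Char), 0 < n → n ≤ fuel →
    Nat.toDigitsCore 10 fuel n ds = ((Nat.digits 10 n).map Nat.digitChar).reverse ++ ds
  | 0, n, ds, hn, hf => by omega
  | fuel + 1, n, ds, hn, hf => by
      rw [Nat.digits_def' (by norm_num : 1 < 10) hn]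
      by_cases h : n / 10 = 0
      · simp [Nat.toDigitsCore, h]
      · have h1 : 0 < n / 10 := Nat.pos_of_ne_zero h
        have h2 : n / 10 ≤ fuel := by omega
        simp only [Nat.toDigitsCore, h, if_false]
        rw [toDigitsCore_eq fuel (n / 10) _ h1 h2]
        simp

lemma toDigits_eq (n : Nat) (hn : 0 < n) :
    Nat.toDigits 10 n = ((Nat.digits 10 n).map Nat.digitChar).reverse := by
  rw [Nat.toDigits, toDigitsCore_eq (n + 1) n [] hn (by omega), List.append_nil]

lemma toChars_nat (n : Nat) : PySem.Int.toChars (n : Int) = Nat.toDigits 10 n := by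
  simp [PySem.Int.toChars]

-- A's loop computes the parity chain of the digits, least significant first
lemma pvLoopA_eq (n : Nat) : pvLoopA (n : Int) = pvAltNat (Nat.digits 10 n) := by
  induction n using Nat.strong_induction_on with
  | _ n ih =>
    by_cases h : n ≤ 9
    · rw [pvLoopA.eq_def]
      interval_cases n <;> rfl
    · have hn : 0 < n := by omega
      have hd : 0 < n / 10 := by omega
      have hfd : PySem.Int.floordiv (n : Int) 10 = ((n / 10 : Nat) : Int) := by
        simp only [PySem.Int.floordiv, pvFdiv10]
        omega
      rw [pvLoopA.eq_def]
      rw [if_pos (by omega : (n : Int) > 9), hfd, mod_cast_two, mod_cast_two,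
        Nat.digits_def' (by norm_num : 1 < 10) hn,
        Nat.digits_def' (by norm_num : 1 < 10) hd]
      have hm : n % 10 % 2 = n % 2 := by omega
      have hm' : n / 10 % 10 % 2 = n / 10 % 2 := by omega
      by_cases hp : n % 2 = n / 10 % 2
      · rw [if_pos (by simp [hp]), pvAltNat]
        simp [hm, hm', hp]
      · rw [if_neg (by simpa using fun h => hp (by omega)), pvAltNat,
          ← Nat.digits_def' (by norm_num : 1 < 10) hd, ih (n / 10) (by omega)]
        simp [hm, hm', bne_iff_ne, hp]

-- ===== VERDICT (by name: the statement is the Claim_ definition above) =====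
theorem A_changing_number_spec : Claim_equal_A_changing_number := by
  intro f _
  unfold Spec_A_changing_number A_changing_number A_changing_number_alt
  by_cases h : f < 10
  · simp [h]
  · rw [if_neg h, if_neg h]
    have hn : f = ((f.toNat : Nat) : Int) := by omega
    have hpos : 0 < f.toNat := by omega
    rw [hn, PySem.Int.toList_toStr, toChars_nat, toDigits_eq _ hpos,
      pvAltPairs_rev _ (fun d hd => Nat.digits_lt_base (by norm_num) hd),
      pvLoopA_eq]
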